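-- pv_equiv track=rewrite | github.com/TayyabaRafiq/physicalai-textbooksecond | backend/app/services/chunker.py | _add_paragraph_breaks
-- ===== SOURCE A (Python) =====
-- def _add_paragraph_breaks(text: str) -> str:
--     """
--     Add paragraph breaks to text that has none.
--     Useful for handling very long unformatted text.
--
--     Args:
--         text: Text without paragraph breaks
--
--     Returns:
--         Text with added paragraph breaks
--     """
--     # Split by single newlines
--     lines = text.split('\n')
--
--     # Add double newline every N lines (heuristic)
--     lines_per_para = 5
--     result_lines = []
--
--     for i, line in enumerate(lines):
--         result_lines.append(line)
--         if (i + 1) % lines_per_para == 0 and i < len(lines) - 1: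
--             result_lines.append('')  # Add blank line
--
--     return '\n'.join(result_lines)
-- ===== SOURCE B (Python) =====
-- def _add_paragraph_breaks(text: str) -> str:
--     """Chunk-wise re-implementation: group the lines five at a time and
--     join the groups with a blank line, instead of tracking a per-line counter."""
--     lines = text.split('\n')
--     paras = []
--     while lines:
--         paras.append('\n'.join(lines[:5]))
--         lines = lines[5:]
--     return '\n\n'.join(paras)
-- ===== Notes on version B (the rewrite author's own statement) =====
-- stated objective: alternative
-- what changed: Replaced the per-line loop with an (i+1) mod 5 counter and conditional blank-line appends by a chunk-wise loop that slices the split lines five at a time, joins each chunk with a single newline, and joins the chunks with a double newline.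
import Mathlib
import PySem

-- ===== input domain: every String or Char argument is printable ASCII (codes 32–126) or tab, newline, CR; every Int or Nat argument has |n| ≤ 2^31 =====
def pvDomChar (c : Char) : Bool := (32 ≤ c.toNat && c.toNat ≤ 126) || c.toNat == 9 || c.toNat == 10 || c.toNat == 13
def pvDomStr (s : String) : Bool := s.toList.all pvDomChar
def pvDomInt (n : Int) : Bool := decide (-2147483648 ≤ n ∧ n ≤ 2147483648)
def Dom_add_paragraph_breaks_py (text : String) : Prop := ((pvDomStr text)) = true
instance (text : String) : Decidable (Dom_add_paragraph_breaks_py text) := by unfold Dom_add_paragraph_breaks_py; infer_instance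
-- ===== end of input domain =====

-- B replaces A's per-line loop with an (i+1)%5 counter by chunk-wise grouping of
-- the lines five at a time (same output; objective: alternative decomposition).


-- ===== PORT A =====
-- lines = text.split('\n'); for i, line in enumerate(lines): append line, and append ''
-- when (i+1) % 5 == 0 and i < len(lines)-1; return '\n'.join(result_lines).
-- (Ported on List Char via PySem.Chars; exact for str.split/join on every string.)
def add_paragraph_breaks_py (text : String) : String :=
  let lines := PySem.Chars.splitOn text.toList ['\n']
  let result_lines := (PySem.List.enumerate lines 0).foldl
    (fun acc p =>
      let acc2 := acc ++ [p.2]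
      if PySem.Int.mod (p.1 + 1) 5 = 0 ∧ p.1 < (lines.length : Int) - 1 then acc2 ++ [([] : List Char)]
      else acc2) []
  String.ofList (PySem.Chars.join ['\n'] result_lines)

-- ===== PORT B =====
-- while lines: paras.append('\n'.join(lines[:5])); lines = lines[5:]
def pvChunks (ls : List (List Char)) : List (List Char) :=
  if hnil : ls = [] then []
  else
    PySem.Chars.join ['\n'] (PySem.List.slice ls none (some 5)) ::
      pvChunks (PySem.List.slice ls (some 5) none)
termination_by ls.length
decreasing_by
  rw [PySem.List.slice_from _ (by norm_num)]
  have : 0 < ls.length := List.length_pos_iff.mpr hnil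
  simp [List.length_drop]
  omega

def add_paragraph_breaks_py_alt (text : String) : String :=
  String.ofList (PySem.Chars.join ['\n', '\n'] (pvChunks (PySem.Chars.splitOn text.toList ['\n'])))

-- ===== PRECONDITION & SPEC =====
def Spec_add_paragraph_breaks_py (text : String) (out : String) : Prop := out = add_paragraph_breaks_py_alt text
instance (text : String) (out : String) : Decidable (Spec_add_paragraph_breaks_py text out) := by unfold Spec_add_paragraph_breaks_py; infer_instance

-- ===== CLAIM (what is proved, stated in full; the proofs are below) =====
def Claim_equal_add_paragraph_breaks_py : Prop := ∀ (text : String), Dom_add_paragraph_breaks_py text → Spec_add_paragraph_breaks_py text (add_paragraph_breaks_py text)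

-- ===== LEMMAS AND PROOFS =====

-- Recursive characterization of A's loop body (what result_lines holds, starting at index s).
def pvLoopA (s n : Int) : List (List Char) → List (List Char)
  | [] => []
  | x :: xs =>
    x :: (if PySem.Int.mod (s + 1) 5 = 0 ∧ s < n - 1
          then ([] : List Char) :: pvLoopA (s + 1) n xs
          else pvLoopA (s + 1) n xs)

lemma pvFoldA (n : Int) : ∀ (ls : List (List Char)) (s : Int) (acc : List (List Char)),
    (PySem.List.enumerate ls s).foldl
      (fun acc p =>
        let acc2 := acc ++ [p.2]
        if PySem.Int.mod (p.1 + 1) 5 = 0 ∧ p.1 < n - 1 then acc2 ++ [([] : List Char)] else acc2)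
      acc = acc ++ pvLoopA s n ls := by
  intro ls
  induction ls with
  | nil => intro s acc; simp [PySem.List.enumerate_nil, pvLoopA]
  | cons x xs ih =>
    intro s acc
    rw [PySem.List.enumerate_cons, List.foldl_cons, ih]
    simp only [pvLoopA]
    split_ifs <;> simp

-- The loop only looks at the index relative to n, shifting both by 5 changes nothing.
lemma pvLoopA_shift : ∀ (ls : List (List Char)) (s n : Int),
    pvLoopA (s + 5) (n + 5) ls = pvLoopA s n ls := by
  intro ls
  induction ls with
  | nil => intro s n; simp [pvLoopA]
  | cons x xs ih =>
    intro s n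
    simp only [pvLoopA]
    have hmod : PySem.Int.mod (s + 5 + 1) 5 = PySem.Int.mod (s + 1) 5 := by
      rw [PySem.Int.mod_eq_emod_of_pos (by norm_num), PySem.Int.mod_eq_emod_of_pos (by norm_num)]
      have : s + 5 + 1 = s + 1 + 5 := by ring
      rw [this, Int.add_emod_right]
    simp only [hmod, show ((s + 5 < n + 5 - 1) ↔ (s < n - 1)) from by omega]
    rw [show s + 5 + 1 = s + 1 + 5 from by ring, ih]

-- Unfolding A's loop across one full chunk of five lines (with more lines to come).
lemma pvLoopA_six (a b c d e : List Char) (t : List (List Char)) (n : Int) (hn : 4 < n - 1) :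
    pvLoopA 0 n (a::b::c::d::e::t) = a::b::c::d::e::([]:List Char)::pvLoopA 5 n t := by
  simp only [pvLoopA]
  norm_num [PySem.Int.mod_eq_emod_of_pos, hn]

-- Main list-level equivalence.
lemma pvMain : ∀ (N : Nat) (ls : List (List Char)), ls.length = N →
    PySem.Chars.join ['\n'] (pvLoopA 0 (ls.length : Int) ls) =
      PySem.Chars.join ['\n', '\n'] (pvChunks ls) := by
  intro N
  induction N using Nat.strong_induction_on with
  | _ N ih =>
    intro ls hN
    match ls with
    | [] => rw [pvChunks.eq_def]; simp [pvLoopA]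
    | [a] =>
      rw [pvChunks.eq_def]
      simp [pvLoopA, pvChunks, PySem.List.slice_to _ (by norm_num : (0:Int) ≤ 5),
        PySem.List.slice_from _ (by norm_num : (0:Int) ≤ 5)]
    | [a, b] =>
      rw [pvChunks.eq_def]
      simp [pvLoopA, pvChunks, PySem.List.slice_to _ (by norm_num : (0:Int) ≤ 5),
        PySem.List.slice_from _ (by norm_num : (0:Int) ≤ 5)]
    | [a, b, c] =>
      rw [pvChunks.eq_def]
      simp [pvLoopA, pvChunks, PySem.List.slice_to _ (by norm_num : (0:Int) ≤ 5),
        PySem.List.slice_from _ (by norm_num : (0:Int) ≤ 5)]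
    | [a, b, c, d] =>
      rw [pvChunks.eq_def]
      simp [pvLoopA, pvChunks, PySem.List.slice_to _ (by norm_num : (0:Int) ≤ 5),
        PySem.List.slice_from _ (by norm_num : (0:Int) ≤ 5)]
    | [a, b, c, d, e] =>
      rw [pvChunks.eq_def]
      simp [pvLoopA, pvChunks, PySem.List.slice_to _ (by norm_num : (0:Int) ≤ 5),
        PySem.List.slice_from _ (by norm_num : (0:Int) ≤ 5)]
    | a :: b :: c :: d :: e :: f :: rest =>
      have hn : (4:Int) < (((a::b::c::d::e::f::rest).length : Nat) : Int) - 1 := by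
        simp; omega
      have hA := pvLoopA_six a b c d e (f :: rest) _ hn
      have hsh := pvLoopA_shift (f :: rest) 0 ((((f::rest).length : Nat) : Int))
      have hn5 : (((f::rest).length : Nat) : Int) + 5 = (((a::b::c::d::e::f::rest).length : Nat) : Int) := by
        simp; omega
      rw [show (0:Int) + 5 = 5 from by norm_num, hn5] at hsh
      have hB : pvChunks (a::b::c::d::e::f::rest)
          = PySem.Chars.join ['\n'] [a,b,c,d,e] :: pvChunks (f::rest) := by
        rw [pvChunks.eq_def]
        rw [PySem.List.slice_to _ (by norm_num : (0:Int) ≤ 5),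
          PySem.List.slice_from _ (by norm_num : (0:Int) ≤ 5)]
        rw [dif_neg (by simp)]
        rfl
      have hd : pvLoopA 0 ((((f::rest).length : Nat) : Int)) (f :: rest)
          = f :: (if PySem.Int.mod (0 + 1) 5 = 0 ∧ (0:Int) < (((f::rest).length : Nat) : Int) - 1
                  then ([] : List Char) :: pvLoopA (0 + 1) ((((f::rest).length : Nat) : Int)) rest
                  else pvLoopA (0 + 1) ((((f::rest).length : Nat) : Int)) rest) := by
        simp only [pvLoopA]
      obtain ⟨u, v, hc⟩ : ∃ u v, pvChunks (f :: rest) = u :: v := by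
        rw [pvChunks.eq_def]; simp
      have hih := ih ((f::rest).length) (by simp at hN ⊢; omega) (f :: rest) rfl
      rw [hA, ← hsh, hsh, hd] at *
      rw [hc] at hih
      rw [hB, hc]
      simp only [PySem.Chars.join_cons_cons, PySem.Chars.join_singleton]
      rw [hih]
      simp [List.append_assoc]

-- ===== VERDICT (by name: the statement is the Claim_ definition above) =====
theorem add_paragraph_breaks_py_spec : Claim_equal_add_paragraph_breaks_py := by
  intro text _
  unfold Spec_add_paragraph_breaks_py add_paragraph_breaks_py add_paragraph_breaks_py_alt
  simp only []
  rw [pvFoldA]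
  simp only [List.nil_append]
  exact congrArg String.ofList (pvMain _ _ rfl)
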